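-- pv_equiv track=rewrite | github.com/rishikesh2715/depth_cotton_balls | annotation/scripts/sample_frames.py | pick_frames
-- ===== SOURCE A (Python) =====
-- def pick_frames(frame_infos, target: int, min_stride: int):
--     """Greedy: prefer frames with more bolls, enforce a minimum-stride gap."""
--     # Sort descending by number of bolls, tie-break by frame idx
--     ranked = sorted(frame_infos, key=lambda t: (-len(t[1]), t[0]))
--     chosen = []
--     chosen_idx = set()
--     for idx, bolls in ranked:
--         if len(chosen) >= target:
--             break
--         if any(abs(idx - c) < min_stride for c in chosen_idx):
--             continue
--         chosen.append((idx, bolls))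
--         chosen_idx.add(idx)
--     chosen.sort(key=lambda t: t[0])
--     return chosen
-- ===== SOURCE B (Python) =====
-- def _insort(chosen, idx, bolls, min_stride):
--     """Insert (idx, bolls) into the idx-sorted list `chosen` (after equal idxs),
--     or return None if some already-chosen frame lies within min_stride."""
--     for pos, (e_idx, _e_bolls) in enumerate(chosen):
--         if idx < e_idx:
--             if e_idx - idx < min_stride:
--                 return None
--             return chosen[:pos] + [(idx, bolls)] + chosen[pos:]
--         if idx - e_idx < min_stride:
--             return None
--     return chosen + [(idx, bolls)]
--
--
-- def pick_frames(frame_infos, target: int, min_stride: int):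
--     """Greedy: prefer frames with more bolls, enforce a minimum-stride gap."""
--     ranked = sorted(frame_infos, key=lambda t: (-len(t[1]), t[0]))
--     chosen = []  # kept sorted by frame idx; no final sort needed
--     for idx, bolls in ranked:
--         if len(chosen) >= target:
--             break
--         new = _insort(chosen, idx, bolls, min_stride)
--         if new is not None:
--             chosen = new
--     return chosen
-- ===== Notes on version B (the rewrite author's own statement) =====
-- stated objective: alternative
-- what changed: B maintains one idx-sorted chosen list and does a single insert-walk per candidate that checks only the stride against neighbours met along the way, replacing A's full scan of a separate index set plus the final sort of the chosen list.
import Mathlib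
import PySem

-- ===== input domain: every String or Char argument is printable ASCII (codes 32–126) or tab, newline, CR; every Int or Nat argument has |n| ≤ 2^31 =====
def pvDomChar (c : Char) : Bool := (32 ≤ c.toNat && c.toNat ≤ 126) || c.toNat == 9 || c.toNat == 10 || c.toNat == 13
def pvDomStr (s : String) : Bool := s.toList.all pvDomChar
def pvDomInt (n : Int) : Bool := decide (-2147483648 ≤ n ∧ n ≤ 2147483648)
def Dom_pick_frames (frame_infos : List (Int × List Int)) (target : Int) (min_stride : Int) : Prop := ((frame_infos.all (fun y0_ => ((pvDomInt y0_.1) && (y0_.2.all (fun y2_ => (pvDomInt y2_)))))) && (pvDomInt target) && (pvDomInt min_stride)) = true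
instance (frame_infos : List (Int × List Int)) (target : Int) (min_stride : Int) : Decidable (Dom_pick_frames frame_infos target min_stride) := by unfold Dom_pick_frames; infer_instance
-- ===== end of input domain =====

-- B replaces A's scan-the-whole-set stride check, append and final sort by one
-- idx-sorted list maintained with a single insert-with-neighbour-check pass (alternative decomposition).

-- ===== PORT A =====
-- loop body of A; the 'break' is a frozen-state guard (once len(chosen) >= target nothing changes)
def pickStepA (target min_stride : Int) (st : List (Int × List Int) × PySem.Set Int)
    (t : Int × List Int) : List (Int × List Int) × PySem.Set Int :=
  if (st.1.length : Int) ≥ target then st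
  else if st.2.any (fun c => decide (|t.1 - c| < min_stride)) then st
  else (st.1 ++ [t], PySem.Set.add st.2 t.1)

def pick_frames (frame_infos : List (Int × List Int)) (target : Int) (min_stride : Int) : List (Int × List Int) :=
  let ranked := PySem.List.sorted2 frame_infos (fun t => -(t.2.length : Int)) (fun t => t.1)
  let st := ranked.foldl (pickStepA target min_stride) ([], PySem.Set.empty)
  PySem.List.sorted st.1 (fun t => t.1)

-- ===== PORT B =====
-- Source B's _insort: walk the idx-sorted list; none = blocked (a chosen frame within min_stride)
def insortB (chosen : List (Int × List Int)) (idx : Int) (bolls : List Int) (min_stride : Int) :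
    Option (List (Int × List Int)) :=
  match chosen with
  | [] => some [(idx, bolls)]
  | e :: rest =>
    if idx < e.1 then
      if e.1 - idx < min_stride then none
      else some ((idx, bolls) :: e :: rest)
    else if idx - e.1 < min_stride then none
    else
      match insortB rest idx bolls min_stride with
      | none => none
      | some r => some (e :: r)

def pickStepB (target min_stride : Int) (chosen : List (Int × List Int))
    (t : Int × List Int) : List (Int × List Int) :=
  if (chosen.length : Int) ≥ target then chosen
  else
    match insortB chosen t.1 t.2 min_stride with
    | none => chosen
    | some r => r

def pick_frames_alt (frame_infos : List (Int × List Int)) (target : Int) (min_stride : Int) : List (Int × List Int) :=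
  let ranked := PySem.List.sorted2 frame_infos (fun t => -(t.2.length : Int)) (fun t => t.1)
  ranked.foldl (pickStepB target min_stride) []

-- ===== PRECONDITION & SPEC =====
def Spec_pick_frames (frame_infos : List (Int × List Int)) (target : Int) (min_stride : Int) (out : List (Int × List Int)) : Prop := out = pick_frames_alt frame_infos target min_stride
instance (frame_infos : List (Int × List Int)) (target : Int) (min_stride : Int) (out : List (Int × List Int)) : Decidable (Spec_pick_frames frame_infos target min_stride out) := by unfold Spec_pick_frames; infer_instance

-- ===== CLAIM (what is proved, stated in full; the proofs are below) =====
def Claim_equal_pick_frames : Prop := ∀ (frame_infos : List (Int × List Int)) (target : Int) (min_stride : Int), Dom_pick_frames frame_infos target min_stride → Spec_pick_frames frame_infos target min_stride (pick_frames frame_infos target min_stride)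

-- ===== LEMMAS AND PROOFS =====

-- on an idx-sorted list, the local neighbour check of insortB is exactly "some chosen idx within min_stride"
lemma insortB_eq_none_iff (lst : List (Int × List Int)) (idx : Int) (bolls : List Int) (m : Int)
    (h : lst.Pairwise (fun a b => a.1 ≤ b.1)) :
    insortB lst idx bolls m = none ↔ ∃ e ∈ lst, |idx - e.1| < m := by
  induction lst with
  | nil => simp [insortB]
  | cons e rest ih =>
    rcases List.pairwise_cons.1 h with ⟨he, hrest⟩
    by_cases h1 : idx < e.1
    · by_cases h2 : e.1 - idx < m
      · simp only [insortB, if_pos h1, if_pos h2, true_iff]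
        have habs : |idx - e.1| = -(idx - e.1) := abs_of_neg (by omega)
        exact ⟨e, List.mem_cons_self .., by omega⟩
      · simp only [insortB, if_pos h1, if_neg h2, reduceCtorEq, false_iff]
        rintro ⟨e', he', habs⟩
        have h3 : |idx - e'.1| = -(idx - e'.1) := by
          rcases List.mem_cons.1 he' with rfl | he'
          · exact abs_of_neg (by omega)
          · have := he e' he'; exact abs_of_neg (by omega)
        rcases List.mem_cons.1 he' with rfl | he'
        · omega
        · have := he e' he'; omega
    · rw [not_lt] at h1
      by_cases h2 : idx - e.1 < m
      · simp only [insortB, if_neg (not_lt.2 h1), if_pos h2, true_iff]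
        have habs : |idx - e.1| = idx - e.1 := abs_of_nonneg (by omega)
        exact ⟨e, List.mem_cons_self .., by omega⟩
      · simp only [insortB, if_neg (not_lt.2 h1), if_neg h2]
        have hhead : ¬ |idx - e.1| < m := by
          have habs : |idx - e.1| = idx - e.1 := abs_of_nonneg (by omega)
          omega
        cases hr : insortB rest idx bolls m with
        | none =>
          simp only [true_iff]
          rcases (ih hrest).1 hr with ⟨e', he', habs⟩
          exact ⟨e', List.mem_cons_of_mem _ he', habs⟩
        | some r =>
          simp only [reduceCtorEq, false_iff]
          rintro ⟨e', he', habs⟩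
          rcases List.mem_cons.1 he' with rfl | he'
          · exact hhead habs
          · have hn := (ih hrest).2 ⟨e', he', habs⟩
            rw [hr] at hn
            simp at hn

-- when insortB succeeds it performs exactly the insertBy insertion (after equal idxs)
lemma insortB_eq_some (lst : List (Int × List Int)) (idx : Int) (bolls : List Int) (m : Int)
    (r : List (Int × List Int)) (h : insortB lst idx bolls m = some r) :
    r = PySem.List.insertBy (fun a b => decide (a.1 < b.1)) (idx, bolls) lst := by
  induction lst generalizing r with
  | nil =>
    simp only [insortB, Option.some.injEq] at h
    simp [PySem.List.insertBy, ← h]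
  | cons e rest ih =>
    by_cases h1 : idx < e.1
    · by_cases h2 : e.1 - idx < m
      · simp [insortB, h1, h2] at h
      · simp only [insortB, if_pos h1, if_neg h2, Option.some.injEq] at h
        simp [PySem.List.insertBy, h1, ← h]
    · rw [not_lt] at h1
      by_cases h2 : idx - e.1 < m
      · simp [insortB, not_lt.2 h1, h2] at h
      · simp only [insortB, if_neg (not_lt.2 h1), if_neg h2] at h
        cases hr : insortB rest idx bolls m with
        | none => rw [hr] at h; simp at h
        | some r' =>
          rw [hr] at h
          simp only [Option.some.injEq] at h
          simp [PySem.List.insertBy, not_lt.2 h1, ← h, ih r' hr]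

-- a stable sort of c ++ [x] is insertBy x into the stable sort of c
lemma sorted_append_singleton (c : List (Int × List Int)) (x : Int × List Int) :
    PySem.List.sorted (c ++ [x]) (fun t => t.1)
      = PySem.List.insertBy (fun a b => decide (a.1 < b.1)) x (PySem.List.sorted c (fun t => t.1)) := by
  rw [PySem.List.sorted_eq_foldl_insertBy, PySem.List.sorted_eq_foldl_insertBy, List.foldl_append]
  simp

-- loop invariant: B's state is A's chosen list stably sorted by idx, while A's set holds exactly the chosen idxs
lemma loop_eq (ranked : List (Int × List Int)) (target m : Int) :
    ∀ (c : List (Int × List Int)) (s : PySem.Set Int),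
      (∀ x : Int, x ∈ s ↔ x ∈ c.map Prod.fst) →
      List.foldl (pickStepB target m) (PySem.List.sorted c (fun t => t.1)) ranked
        = PySem.List.sorted (List.foldl (pickStepA target m) (c, s) ranked).1 (fun t => t.1) := by
  induction ranked with
  | nil => intro c s _; rfl
  | cons t rest ih =>
    intro c s hs
    simp only [List.foldl_cons]
    by_cases hlen : (c.length : Int) ≥ target
    · have hlenB : ((PySem.List.sorted c (fun t => t.1)).length : Int) ≥ target := by
        rw [PySem.List.length_sorted]; exact hlen
      rw [show pickStepB target m (PySem.List.sorted c (fun t => t.1)) t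
            = PySem.List.sorted c (fun t => t.1) by simp only [pickStepB, if_pos hlenB],
          show pickStepA target m (c, s) t = (c, s) by simp only [pickStepA, if_pos hlen]]
      exact ih c s hs
    · have hlenB : ¬ ((PySem.List.sorted c (fun t => t.1)).length : Int) ≥ target := by
        rw [PySem.List.length_sorted]; exact hlen
      have hsortP : (PySem.List.sorted c (fun t : Int × List Int => t.1)).Pairwise
          (fun a b => a.1 ≤ b.1) := PySem.List.sorted_pairwise c (fun t => t.1)
      have hex : (s.any (fun x => decide (|t.1 - x| < m)) = true)
          ↔ ∃ e ∈ PySem.List.sorted c (fun t : Int × List Int => t.1), |t.1 - e.1| < m := by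
        rw [List.any_eq_true]
        constructor
        · rintro ⟨x, hx, hp⟩
          rcases List.mem_map.1 ((hs x).1 hx) with ⟨e, hec, rfl⟩
          exact ⟨e, (PySem.List.mem_sorted c _ false e).2 hec, by simpa using hp⟩
        · rintro ⟨e, hes, hp⟩
          refine ⟨e.1, (hs e.1).2 (List.mem_map.2 ⟨e, (PySem.List.mem_sorted c _ false e).1 hes, rfl⟩), by simpa using hp⟩
      by_cases hblock : ∃ e ∈ PySem.List.sorted c (fun t : Int × List Int => t.1), |t.1 - e.1| < m
      · have hnone : insortB (PySem.List.sorted c (fun t => t.1)) t.1 t.2 m = none :=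
          (insortB_eq_none_iff _ _ _ _ hsortP).2 hblock
        rw [show pickStepB target m (PySem.List.sorted c (fun t => t.1)) t
              = PySem.List.sorted c (fun t => t.1) by simp only [pickStepB, if_neg hlenB, hnone],
            show pickStepA target m (c, s) t = (c, s) by
              simp only [pickStepA, if_neg hlen, if_pos (hex.2 hblock)]]
        exact ih c s hs
      · have hany : ¬ s.any (fun x => decide (|t.1 - x| < m)) = true := fun hc => hblock (hex.1 hc)
        have hnn : insortB (PySem.List.sorted c (fun t => t.1)) t.1 t.2 m ≠ none := by
          intro hc; exact hblock ((insortB_eq_none_iff _ _ _ _ hsortP).1 hc)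
        cases hr : insortB (PySem.List.sorted c (fun t => t.1)) t.1 t.2 m with
        | none => exact absurd hr hnn
        | some r =>
          have hrval : r = PySem.List.sorted (c ++ [t]) (fun t => t.1) := by
            rw [insortB_eq_some _ _ _ _ _ hr, sorted_append_singleton]
          rw [show pickStepB target m (PySem.List.sorted c (fun t => t.1)) t = r by
                simp only [pickStepB, if_neg hlenB, hr],
              show pickStepA target m (c, s) t = (c ++ [t], PySem.Set.add s t.1) by
                simp only [pickStepA, if_neg hlen, if_neg hany],
              hrval]
          refine ih (c ++ [t]) (PySem.Set.add s t.1) ?_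
          intro x
          rw [PySem.Set.mem_add]
          simp only [List.map_append, List.map_cons, List.map_nil, List.mem_append,
            List.mem_singleton]
          rw [hs x]

-- ===== VERDICT (by name: the statement is the Claim_ definition above) =====
theorem pick_frames_spec : Claim_equal_pick_frames := by
  intro frame_infos target min_stride _
  unfold Spec_pick_frames pick_frames pick_frames_alt
  have h := loop_eq (PySem.List.sorted2 frame_infos (fun t => -(t.2.length : Int)) (fun t => t.1))
      target min_stride [] PySem.Set.empty (by intro x; simp [PySem.Set.empty])
  simpa using h.symm
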